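-- pv_equiv track=rewrite | github.com/Arrrlex/models-under-pressure | src/models_under_pressure/dataset.py | distribute_samples_evenly
-- ===== SOURCE A (Python) =====
-- from typing import Any, Dict, List, Union
--
-- def distribute_samples_evenly(total_samples: int, n_leaves: int) -> List[int]:
--     """
--     Distributes total_samples across n_leaves as evenly as possible.
--     Returns a list of sample counts for each leaf.
--     """
--     if n_leaves == 0:
--         return [2]
--     base = total_samples // n_leaves
--     remainder = total_samples % n_leaves
--     distribution = [base] * n_leaves
--     # Distribute remainder
--     for i in range(remainder):
--         distribution[i] += 1
--     return distribution
-- ===== SOURCE B (Python) =====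
-- from typing import List
--
-- def distribute_samples_evenly(total_samples: int, n_leaves: int) -> List[int]:
--     """
--     Distributes total_samples across n_leaves as evenly as possible.
--     Greedy: each leaf takes the ceiling of (remaining samples / leaves left).
--     """
--     if n_leaves == 0:
--         return [2]
--     result = []
--     while n_leaves > 0:
--         c = -(-total_samples // n_leaves)  # ceiling division
--         result.append(c)
--         total_samples -= c
--         n_leaves -= 1
--     return result
-- ===== Notes on version B (the rewrite author's own statement) =====
-- stated objective: alternative
-- what changed: Replaces the divmod-then-patch approach (precompute base and remainder, fill a uniform list, increment a prefix) with a greedy single loop that gives each leaf the ceiling of remaining/leaves_left, updating the remaining total as it goes; no base/remainder is ever computed.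
import Mathlib
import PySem

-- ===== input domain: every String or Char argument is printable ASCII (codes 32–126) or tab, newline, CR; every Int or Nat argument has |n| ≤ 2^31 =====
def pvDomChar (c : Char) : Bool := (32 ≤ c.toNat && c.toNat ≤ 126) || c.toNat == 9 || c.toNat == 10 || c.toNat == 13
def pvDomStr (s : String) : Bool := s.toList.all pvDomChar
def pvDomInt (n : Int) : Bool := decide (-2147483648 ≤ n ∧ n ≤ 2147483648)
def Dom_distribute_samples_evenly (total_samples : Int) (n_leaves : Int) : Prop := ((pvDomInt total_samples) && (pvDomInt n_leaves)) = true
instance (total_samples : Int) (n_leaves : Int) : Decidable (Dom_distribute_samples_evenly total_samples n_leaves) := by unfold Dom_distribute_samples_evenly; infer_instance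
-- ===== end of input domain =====

-- B replaces A's divmod-then-patch construction by a greedy loop giving each leaf ceil(remaining/left) (objective: alternative).

-- ===== PORT A =====
def distribute_samples_evenly (total_samples : Int) (n_leaves : Int) : List Int :=
  if n_leaves = 0 then [2]
  else
    let base := PySem.Int.floordiv total_samples n_leaves
    let remainder := PySem.Int.mod total_samples n_leaves
    let distribution := List.replicate n_leaves.toNat base
    -- for i in range(remainder): distribution[i] += 1  (i is provably in range when the loop runs)
    (PySem.List.pyRange 0 remainder 1).foldl (fun d i => d.modify i.toNat (· + 1)) distribution

-- ===== PORT B =====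
-- while n_leaves > 0: c = -(-total_samples // n_leaves); result.append(c); total_samples -= c; n_leaves -= 1
def pvDistLoop (total_samples : Int) (n_leaves : Int) : List Int :=
  if h : 0 < n_leaves then
    let c := -(PySem.Int.floordiv (-total_samples) n_leaves)
    c :: pvDistLoop (total_samples - c) (n_leaves - 1)
  else []
termination_by n_leaves.toNat
decreasing_by omega

def distribute_samples_evenly_alt (total_samples : Int) (n_leaves : Int) : List Int :=
  if n_leaves = 0 then [2]
  else pvDistLoop total_samples n_leaves

-- ===== PRECONDITION & SPEC =====
def Spec_distribute_samples_evenly (total_samples : Int) (n_leaves : Int) (out : List Int) : Prop := out = distribute_samples_evenly_alt total_samples n_leaves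
instance (total_samples : Int) (n_leaves : Int) (out : List Int) : Decidable (Spec_distribute_samples_evenly total_samples n_leaves out) := by unfold Spec_distribute_samples_evenly; infer_instance

-- ===== CLAIM (what is proved, stated in full; the proofs are below) =====
def Claim_equal_distribute_samples_evenly : Prop := ∀ (total_samples : Int) (n_leaves : Int), Dom_distribute_samples_evenly total_samples n_leaves → Spec_distribute_samples_evenly total_samples n_leaves (distribute_samples_evenly total_samples n_leaves)

-- ===== LEMMAS AND PROOFS =====

-- modifying at the length of the left part modifies the head of the right part
theorem pv_modify_append_len {α : Type} (f : α → α) (l1 l2 : List α) :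
    (l1 ++ l2).modify l1.length f = l1 ++ l2.modify 0 f := by
  induction l1 with
  | nil => simp
  | cons a t ih => simpa [List.modify] using ih

theorem pv_modify_append_at {α : Type} (f : α → α) (l1 l2 : List α) (r : Nat)
    (h : l1.length = r) : (l1 ++ l2).modify r f = l1 ++ l2.modify 0 f := by
  subst h; exact pv_modify_append_len f l1 l2

-- A-side loop invariant: after the first r iterations the list is r copies of base+1 then n-r of base
theorem pv_loop_eq (base : Int) (n r : Nat) (h : r ≤ n) :
    (PySem.List.pyRange 0 (r : Int) 1).foldl (fun d i => d.modify i.toNat (· + 1))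
        (List.replicate n base)
      = List.replicate r (base + 1) ++ List.replicate (n - r) base := by
  induction r with
  | zero => simp [PySem.List.pyRange_one_eq_nil]
  | succ r ih =>
    have hr : ((r : Int) + 1) = ((r + 1 : Nat) : Int) := by push_cast; ring
    have hsplit := PySem.List.pyRange_one_succ_right (a := 0) (b := (r : Int)) (by positivity)
    rw [← hr, hsplit, List.foldl_append, ih (by omega)]
    have hlen : (List.replicate r (base + 1)).length = r := by simp
    have hrep : List.replicate (n - r) base = base :: List.replicate (n - r - 1) base := by
      rw [← List.replicate_succ]; congr 1; omega
    have hc : n - r - 1 = n - (r + 1) := by omega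
    simp only [List.foldl_cons, List.foldl_nil, Int.toNat_natCast]
    rw [pv_modify_append_at _ _ _ _ hlen, hrep]
    simp [List.modify, List.replicate_succ', List.append_assoc, hc]

-- B-side: the greedy ceiling loop produces the same closed form.
-- Parametrised by the decomposition t = q*n + r with 0 ≤ r ≤ n.
theorem pv_dist_loop_eq (n : Nat) (q r : Int) (hr0 : 0 ≤ r) (hrn : r ≤ (n : Int)) :
    pvDistLoop (q * (n : Int) + r) (n : Int)
      = List.replicate r.toNat (q + 1) ++ List.replicate (n - r.toNat) q := by
  induction n generalizing q r with
  | zero =>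
    rw [pvDistLoop]
    have : r = 0 := by omega
    simp [this]
  | succ n ih =>
    have hnpos : (0 : Int) < ((n + 1 : Nat) : Int) := by positivity
    rw [pvDistLoop]
    simp only [dif_pos hnpos]
    have hn1 : ((n + 1 : Nat) : Int) - 1 = (n : Int) := by push_cast; ring
    by_cases hr : r = 0
    · -- c = q : (q-1)*(n+1) < q*(n+1) + 0 ≤ q*(n+1)
      have hc : -(PySem.Int.floordiv (-(q * ((n + 1 : Nat) : Int) + r)) ((n + 1 : Nat) : Int)) = q := by
        rw [PySem.Int.neg_floordiv_neg_eq_iff_of_pos hnpos]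
        constructor
        · have he : (q - 1) * ((n + 1 : Nat) : Int) = q * ((n + 1 : Nat) : Int) - ((n + 1 : Nat) : Int) := by ring
          rw [he, hr]; linarith
        · rw [hr]; linarith
      rw [hc]
      have harg : q * ((n + 1 : Nat) : Int) + r - q = q * (n : Int) + 0 := by
        push_cast; rw [hr]; ring
      rw [harg, hn1, ih q 0 le_rfl (by positivity)]
      subst hr
      simp [List.replicate_succ]
    · -- r > 0, c = q + 1 : q*(n+1) < q*(n+1)+r ≤ (q+1)*(n+1)
      have hrpos : 0 < r := lt_of_le_of_ne hr0 (Ne.symm hr)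
      have hc : -(PySem.Int.floordiv (-(q * ((n + 1 : Nat) : Int) + r)) ((n + 1 : Nat) : Int)) = q + 1 := by
        rw [PySem.Int.neg_floordiv_neg_eq_iff_of_pos hnpos]
        constructor
        · have he : (q + 1 - 1) * ((n + 1 : Nat) : Int) = q * ((n + 1 : Nat) : Int) := by ring
          rw [he]; linarith
        · have he : (q + 1) * ((n + 1 : Nat) : Int) = q * ((n + 1 : Nat) : Int) + ((n + 1 : Nat) : Int) := by ring
          rw [he]; linarith
      rw [hc]
      have harg : q * ((n + 1 : Nat) : Int) + r - (q + 1) = q * (n : Int) + (r - 1) := by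
        push_cast; ring
      rw [harg, hn1, ih q (r - 1) (by omega) (by push_cast at hrn ⊢; omega)]
      have h1 : r.toNat = (r - 1).toNat + 1 := by omega
      have h2 : n - (r - 1).toNat = n + 1 - r.toNat := by omega
      rw [h1, h2, List.replicate_succ]
      simp
      omega

-- ===== VERDICT (by name: the statement is the Claim_ definition above) =====
theorem distribute_samples_evenly_spec : Claim_equal_distribute_samples_evenly := by
  intro t n _
  unfold Spec_distribute_samples_evenly distribute_samples_evenly distribute_samples_evenly_alt
  by_cases h0 : n = 0
  · simp [h0]
  · simp only [if_neg h0]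
    set base := PySem.Int.floordiv t n with hbase
    set r := PySem.Int.mod t n with hr
    rcases lt_or_gt_of_ne h0 with hneg | hpos
    · -- n < 0: both sides are []
      obtain ⟨hb1, hb2⟩ := PySem.Int.mod_neg_bounds (a := t) (b := n) hneg
      have hn : n.toNat = 0 := by omega
      have hrange : PySem.List.pyRange 0 r 1 = [] :=
        PySem.List.pyRange_one_eq_nil (by omega)
      rw [pvDistLoop]
      simp [hn, hrange, dif_neg (show ¬ (0:Int) < n by omega)]
    · -- n > 0: both sides equal the closed form
      have h1 : 0 ≤ r := PySem.Int.mod_nonneg (a := t) hpos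
      have h2 : r < n := PySem.Int.mod_lt (a := t) hpos
      have hdecomp : base * n + r = t := PySem.Int.floordiv_mul_add_mod t n
      have hrcast : r = ((r.toNat : Nat) : Int) := by omega
      have hncast : n = ((n.toNat : Nat) : Int) := by omega
      calc (PySem.List.pyRange 0 r 1).foldl (fun d i => d.modify i.toNat (· + 1))
              (List.replicate n.toNat base)
          = List.replicate r.toNat (base + 1) ++ List.replicate (n.toNat - r.toNat) base := by
            rw [hrcast]
            exact pv_loop_eq base n.toNat r.toNat (by omega)
        _ = pvDistLoop t n := by
            rw [← hdecomp, hncast]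
            rw [pv_dist_loop_eq n.toNat base r (by omega) (by omega), Int.toNat_natCast]
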